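-- pv_equiv track=rewrite | github.com/KULeuven-MICAS/stream | stream/compiler/transforms/convert_stream_to_aie.py | canonicalize_transformation
-- ===== SOURCE A (Python) =====
-- from collections.abc import Sequence
--
-- def canonicalize_transformation(sizes: Sequence[int], strides: Sequence[int]) -> tuple[list[int], list[int]]:
--     """
--     Examples:
--
--         Size 1 can be omitted:
--         [1, 1], [1, 1] -> [], []
--         [4, 1], [1, 1] -> [4], [1]
--         [1, 4], [4, 1] -> [4], [1]
--
--         Squash redundancy:
--         [4, 4], [4, 1] -> [16], [1]
--
--     """
--
--     resulting_strides: list[int] = []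
--     resulting_sizes: list[int] = []
--
--     for size, stride in zip(reversed(sizes), reversed(strides), strict=False):
--         assert size != 0
--         if size == 1:
--             continue
--         if not resulting_sizes:
--             resulting_sizes.insert(0, size)
--             resulting_strides.insert(0, stride)
--             continue
--         # check for squash
--         if stride == resulting_sizes[0] * resulting_strides[0]:
--             resulting_sizes[0] *= size
--         else:
--             resulting_sizes.insert(0, size)
--             resulting_strides.insert(0, stride)
--
--     return resulting_sizes, resulting_strides
-- ===== SOURCE B (Python) =====
-- def canonicalize_transformation(sizes, strides):
--     # inner-to-outer, drop size-1 dimensions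
--     filtered = [(s, st) for s, st in zip(reversed(sizes), reversed(strides)) if s != 1]
--     chains = _split_chains(filtered)
--     out_sizes = [_chain_size(c) for c in reversed(chains)]
--     out_strides = [c[0][1] for c in reversed(chains)]
--     return out_sizes, out_strides
--
-- def _split_chains(pairs):
--     # split into maximal contiguous chains where each stride equals
--     # the previous pair's size*stride
--     chains = []
--     i = 0
--     while i < len(pairs):
--         chain, i = _take_chain(pairs, i)
--         chains.append(chain)
--     return chains
--
-- def _take_chain(pairs, i):
--     # the chain starting at index i, and the index just past it
--     j = i + 1
--     while j < len(pairs) and pairs[j][1] == pairs[j - 1][0] * pairs[j - 1][1]: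
--         j += 1
--     return pairs[i:j], j
--
-- def _chain_size(chain):
--     p = 1
--     for s, _ in chain:
--         p *= s
--     return p
-- ===== Notes on version B (the rewrite author's own statement) =====
-- stated objective: faster
-- what changed: B first filters out size-1 dims, then splits the filtered inner-to-outer pair list into maximal contiguity chains (stride == previous pair's size*stride), and finally reduces each chain to (product of sizes, innermost stride), instead of A's single stateful loop that prepends to its result lists with insert(0, ...).
import Mathlib
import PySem

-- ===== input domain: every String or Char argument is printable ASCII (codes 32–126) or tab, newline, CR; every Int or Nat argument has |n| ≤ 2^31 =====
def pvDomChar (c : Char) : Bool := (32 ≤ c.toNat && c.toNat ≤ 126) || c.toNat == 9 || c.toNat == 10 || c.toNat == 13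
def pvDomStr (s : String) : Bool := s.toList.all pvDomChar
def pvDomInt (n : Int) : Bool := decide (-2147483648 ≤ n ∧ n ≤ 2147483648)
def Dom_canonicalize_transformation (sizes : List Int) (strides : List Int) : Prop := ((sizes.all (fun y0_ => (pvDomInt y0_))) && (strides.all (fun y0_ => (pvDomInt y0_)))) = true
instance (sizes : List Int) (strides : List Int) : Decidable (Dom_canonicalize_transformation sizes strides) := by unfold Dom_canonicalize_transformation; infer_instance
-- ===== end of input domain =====

-- B re-decomposes A's stateful squash loop (which prepends with insert(0,...)) as:
-- filter size-1 dims, split into maximal contiguity chains, reduce each chain to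
-- (size product, base stride); measured faster at scale. Return value only.

-- ===== PORT A =====
def canonA_step (acc : List Int × List Int) (p : Int × Int) : List Int × List Int :=
  if p.1 = 1 then acc
  else
    match acc with
    | ([], ts) => (p.1 :: [], p.2 :: ts)
    | (s0 :: srest, t0 :: trest) =>
        if p.2 = s0 * t0 then ((s0 * p.1) :: srest, t0 :: trest)
        else (p.1 :: s0 :: srest, p.2 :: t0 :: trest)
    | (s0 :: srest, []) => (p.1 :: s0 :: srest, p.2 :: [])  -- unreachable: lists stay parallel

def canonicalize_transformation (sizes : List Int) (strides : List Int) : List Int × List Int :=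
  ((sizes.reverse).zip (strides.reverse)).foldl canonA_step ([], [])

-- ===== PORT B =====
def pvTakeChain (prev : Int × Int) : List (Int × Int) → List (Int × Int) × List (Int × Int)
  | [] => ([], [])
  | q :: rest =>
      if q.2 = prev.1 * prev.2 then
        let r := pvTakeChain q rest
        (q :: r.1, r.2)
      else ([], q :: rest)

theorem pvTakeChain_rest_le (prev : Int × Int) (l : List (Int × Int)) :
    (pvTakeChain prev l).2.length ≤ l.length := by
  induction l generalizing prev with
  | nil => simp [pvTakeChain]
  | cons q rest ih =>
    simp only [pvTakeChain]
    split
    · exact Nat.le_succ_of_le (ih q)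
    · simp

def pvSplitChains : List (Int × Int) → List (List (Int × Int))
  | [] => []
  | p :: ps =>
      (p :: (pvTakeChain p ps).1) :: pvSplitChains (pvTakeChain p ps).2
termination_by l => l.length
decreasing_by
  simp only [List.length_cons]
  exact Nat.lt_succ_of_le (pvTakeChain_rest_le p ps)

def pvChainSize (c : List (Int × Int)) : Int := c.foldl (fun p q => p * q.1) 1

def canonicalize_transformation_alt (sizes : List Int) (strides : List Int) : List Int × List Int :=
  let filtered := ((sizes.reverse).zip (strides.reverse)).filter (fun p => p.1 != 1)
  let chains := pvSplitChains filtered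
  (chains.reverse.map pvChainSize, chains.reverse.map (fun c => (c.headD (0, 0)).2))

-- ===== PRECONDITION & SPEC =====
-- Pre_ excludes exactly the inputs where A's `assert size != 0` raises AssertionError.
def Pre_canonicalize_transformation (sizes : List Int) (strides : List Int) : Prop :=
  ∀ p ∈ (sizes.reverse).zip (strides.reverse), p.1 ≠ 0
instance (sizes : List Int) (strides : List Int) : Decidable (Pre_canonicalize_transformation sizes strides) := by
  unfold Pre_canonicalize_transformation; infer_instance

def pvWitness_canonicalize_transformation : List Int × List Int := ([4, 4], [4, 1])

def Spec_canonicalize_transformation (sizes : List Int) (strides : List Int) (out : List Int × List Int) : Prop := out = canonicalize_transformation_alt sizes strides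
instance (sizes : List Int) (strides : List Int) (out : List Int × List Int) : Decidable (Spec_canonicalize_transformation sizes strides out) := by unfold Spec_canonicalize_transformation; infer_instance

-- ===== CLAIM (what is proved, stated in full; the proofs are below) =====
def Claim_equal_canonicalize_transformation : Prop := ∀ (sizes : List Int) (strides : List Int), Dom_canonicalize_transformation sizes strides → Pre_canonicalize_transformation sizes strides → Spec_canonicalize_transformation sizes strides (canonicalize_transformation sizes strides)


-- ===== LEMMAS AND PROOFS =====

-- A's step ignores size-1 pairs, so folding the zipped list equals folding its filtered form.
theorem foldl_canonA_filter (l : List (Int × Int)) :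
    ∀ acc, l.foldl canonA_step acc = (l.filter (fun p => p.1 != 1)).foldl canonA_step acc := by
  induction l with
  | nil => intro acc; rfl
  | cons q rest ih =>
    intro acc
    by_cases h : q.1 = 1
    · simp [h, canonA_step, ih]
    · simp [h, ih]

theorem pvChainSize_foldl (c : List (Int × Int)) :
    ∀ a : Int, c.foldl (fun p q => p * q.1) a = a * pvChainSize c := by
  induction c with
  | nil => intro a; simp [pvChainSize]
  | cons q r ih =>
    intro a
    simp only [List.foldl_cons, pvChainSize] at *
    rw [ih (a * q.1), ih (1 * q.1)]
    ring

theorem pvChainSize_nil : pvChainSize [] = 1 := rfl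

theorem pvChainSize_cons (q : Int × Int) (c : List (Int × Int)) :
    pvChainSize (q :: c) = q.1 * pvChainSize c := by
  show (q :: c).foldl (fun p q => p * q.1) 1 = _
  rw [List.foldl_cons, pvChainSize_foldl]
  ring

-- The central invariant: folding A's step over a filtered tail, starting from a state whose
-- head (P, b) satisfies P * b = prev.1 * prev.2, produces exactly B's chain decomposition.
theorem fold_chain (l : List (Int × Int)) :
    ∀ (prev : Int × Int) (P b : Int) (rs rt : List Int),
    P * b = prev.1 * prev.2 → (∀ p ∈ l, p.1 ≠ 1) →
    l.foldl canonA_step (P :: rs, b :: rt) =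
      ((pvSplitChains (pvTakeChain prev l).2).reverse.map pvChainSize
          ++ (P * pvChainSize (pvTakeChain prev l).1) :: rs,
       (pvSplitChains (pvTakeChain prev l).2).reverse.map (fun c => (c.headD (0, 0)).2)
          ++ b :: rt) := by
  induction l with
  | nil =>
    intro prev P b rs rt _ _
    simp [pvTakeChain, pvSplitChains, pvChainSize]
  | cons q rest ih =>
    intro prev P b rs rt hPb hne
    have hq1 : q.1 ≠ 1 := hne q (List.mem_cons_self ..)
    by_cases hc : q.2 = prev.1 * prev.2
    · -- q continues the current chain
      have hstep : canonA_step (P :: rs, b :: rt) q = ((P * q.1) :: rs, b :: rt) := by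
        simp [canonA_step, hq1, hc, hPb]
      have hrec := ih q (P * q.1) b rs rt (by rw [← hPb] at hc; rw [hc]; ring)
        (fun p hp => hne p (List.mem_cons_of_mem _ hp))
      simp only [List.foldl_cons, hstep, hrec, pvTakeChain, hc, if_pos]
      rw [pvChainSize_cons, mul_assoc]
    · -- q starts a new chain
      have hstep : canonA_step (P :: rs, b :: rt) q = (q.1 :: P :: rs, q.2 :: b :: rt) := by
        have : q.2 ≠ P * b := by rw [hPb]; exact hc
        simp [canonA_step, hq1, this]
      have hrec := ih q q.1 q.2 (P :: rs) (b :: rt) rfl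
        (fun p hp => hne p (List.mem_cons_of_mem _ hp))
      simp only [List.foldl_cons, hstep, hrec, pvTakeChain, hc, if_neg, not_false_iff]
      rw [pvSplitChains]
      simp [List.map_append, pvChainSize_cons, pvChainSize_nil]

theorem fold_eq_chains (l : List (Int × Int)) (hne : ∀ p ∈ l, p.1 ≠ 1) :
    l.foldl canonA_step ([], []) =
      ((pvSplitChains l).reverse.map pvChainSize,
       (pvSplitChains l).reverse.map (fun c => (c.headD (0, 0)).2)) := by
  cases l with
  | nil => simp [pvSplitChains]
  | cons p ps =>
    have hp1 : p.1 ≠ 1 := hne p (List.mem_cons_self ..)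
    have hstep : canonA_step ([], []) p = ([p.1], [p.2]) := by simp [canonA_step, hp1]
    have hrec := fold_chain ps p p.1 p.2 [] [] rfl
      (fun q hq => hne q (List.mem_cons_of_mem _ hq))
    rw [List.foldl_cons, hstep, hrec, pvSplitChains]
    simp [pvChainSize_cons, List.map_append]

-- ===== VERDICT (by name: the statement is the Claim_ definition above) =====
theorem canonicalize_transformation_spec : Claim_equal_canonicalize_transformation := by
  intro sizes strides _ _
  unfold Spec_canonicalize_transformation canonicalize_transformation canonicalize_transformation_alt
  rw [foldl_canonA_filter]
  exact fold_eq_chains _ (by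
    intro p hp
    have := List.mem_filter.mp hp
    simpa using this.2)
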